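-- pv_equiv track=rewrite | github.com/nguyenhachuy/leetcode | 213-house-robber-ii.py | rob_simple
-- ===== SOURCE A (Python) =====
-- from typing import List
--
-- def rob_simple(nums: List[int], i, j) -> int:
--     t1 = 0
--     t2 = 0
--     for k in reversed(range(i,j)):
--         temp = t1
--         t1 = max(nums[k] + t2, t1)
--         t2 = temp
--
--     return t1
-- ===== SOURCE B (Python) =====
-- from typing import List
--
-- def rob_simple(nums: List[int], i, j) -> int:
--     # top-down memoization of best(k) = max non-adjacent sum over houses [k, j),
--     # driven by an explicit work stack instead of recursion
--     memo = {}
--     stack = [i]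
--     while stack:
--         k = stack.pop()
--         if k >= j or k in memo:
--             continue
--         a = 0 if k + 1 >= j else memo.get(k + 1)
--         b = 0 if k + 2 >= j else memo.get(k + 2)
--         if a is None or b is None:
--             stack += [k, k + 1]
--         else:
--             memo[k] = max(a, nums[k] + b)
--     return memo.get(i, 0)
-- ===== Notes on version B (the rewrite author's own statement) =====
-- stated objective: alternative
-- what changed: B replaces A's backward two-variable rolling loop by top-down memoization of best(k)=max(best(k+1), nums[k]+best(k+2)) (base 0 at k>=j), evaluated with an explicit work stack and a dict memo, returning memo.get(i,0).
import Mathlib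
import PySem

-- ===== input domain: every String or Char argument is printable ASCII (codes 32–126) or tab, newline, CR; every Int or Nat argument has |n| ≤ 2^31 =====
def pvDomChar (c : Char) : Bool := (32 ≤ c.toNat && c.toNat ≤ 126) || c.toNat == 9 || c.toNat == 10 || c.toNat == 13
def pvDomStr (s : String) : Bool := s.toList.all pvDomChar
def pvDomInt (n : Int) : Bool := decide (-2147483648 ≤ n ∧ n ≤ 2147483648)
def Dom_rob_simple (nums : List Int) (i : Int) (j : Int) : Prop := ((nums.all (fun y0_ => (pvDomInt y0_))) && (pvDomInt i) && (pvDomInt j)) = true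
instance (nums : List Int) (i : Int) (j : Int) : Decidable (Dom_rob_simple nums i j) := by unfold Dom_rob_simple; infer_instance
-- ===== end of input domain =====

-- B replaces A's backward rolling-pair loop by top-down memoization driven by an
-- explicit work stack and a dict memo (objective: alternative, same cost).

-- ===== PORT A =====
def rob_simple (nums : List Int) (i : Int) (j : Int) : Int :=
  (((PySem.List.pyRange i j 1).reverse).foldl
    (fun (st : Int × Int) k => (max (PySem.List.pyGetD nums k 0 + st.2) st.1, st.1))
    (0, 0)).1

-- ===== PORT B =====
-- the 'while stack:' loop of Source B; head of the list = top of the Python stack.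
-- The fuel argument is only a termination guard; the proof shows 2*(j-i).toNat+3
-- is always enough, so the port computes exactly what the Python loop computes.
def pvLoopB (nums : List Int) (j : Int) :
    Nat → List Int → PySem.Dict Int Int → PySem.Dict Int Int
  | 0, _, memo => memo
  | _ + 1, [], memo => memo
  | fuel + 1, k :: rest, memo =>
    if j ≤ k ∨ memo.contains k then pvLoopB nums j fuel rest memo
    else
      let a := if j ≤ k + 1 then some 0 else memo.get? (k + 1)
      let b := if j ≤ k + 2 then some 0 else memo.get? (k + 2)
      match a, b with
      | some av, some bv =>
          pvLoopB nums j fuel rest (memo.insert k (max av (PySem.List.pyGetD nums k 0 + bv)))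
      | _, _ => pvLoopB nums j fuel ((k + 1) :: k :: rest) memo

def rob_simple_alt (nums : List Int) (i : Int) (j : Int) : Int :=
  (pvLoopB nums j (2 * (j - i).toNat + 3) [i] PySem.Dict.empty).getD i 0

-- ===== PRECONDITION & SPEC =====
-- Pre_ excludes exactly the inputs where nums[k] raises IndexError in both Pythons
-- (some k in range(i,j) outside the valid, possibly negative, Python index range).
def Pre_rob_simple (nums : List Int) (i : Int) (j : Int) : Prop :=
  i < j → (-(nums.length : Int) ≤ i ∧ j ≤ (nums.length : Int))
instance (nums : List Int) (i : Int) (j : Int) : Decidable (Pre_rob_simple nums i j) := by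
  unfold Pre_rob_simple; infer_instance
def pvWitness_rob_simple : List Int × Int × Int := ([2, 7, 9, 3, 1], 0, 5)

def Spec_rob_simple (nums : List Int) (i : Int) (j : Int) (out : Int) : Prop := out = rob_simple_alt nums i j
instance (nums : List Int) (i : Int) (j : Int) (out : Int) : Decidable (Spec_rob_simple nums i j out) := by unfold Spec_rob_simple; infer_instance

-- ===== CLAIM (what is proved, stated in full; the proofs are below) =====
def Claim_equal_rob_simple : Prop := ∀ (nums : List Int) (i : Int) (j : Int), Dom_rob_simple nums i j → Pre_rob_simple nums i j → Spec_rob_simple nums i j (rob_simple nums i j)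

-- ===== LEMMAS AND PROOFS =====

-- the recurrence both programs compute: best non-adjacent sum over [k, j), floored at 0
def pvG (nums : List Int) (j : Int) (k : Int) : Int :=
  if j ≤ k then 0
  else max (PySem.List.pyGetD nums k 0 + pvG nums j (k + 2)) (pvG nums j (k + 1))
termination_by (j - k).toNat
decreasing_by all_goals omega

-- A's backward fold steps from (pvG i', pvG (i'+1)) down the range
theorem foldA_eq_pvG (nums : List Int) (j : Int) :
    ∀ (n : Nat) (i : Int), (j - i).toNat = n →
      (((PySem.List.pyRange i j 1).reverse).foldl
        (fun (st : Int × Int) k => (max (PySem.List.pyGetD nums k 0 + st.2) st.1, st.1))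
        (0, 0)) = (pvG nums j i, pvG nums j (i + 1)) := by
  intro n
  induction n using Nat.strong_induction_on with
  | _ n ih =>
    intro i hn
    by_cases h : j ≤ i
    · rw [PySem.List.pyRange_one, show (j - i).toNat = 0 from by omega]
      rw [pvG, if_pos h, pvG, if_pos (show j ≤ i + 1 from by omega)]
      rfl
    · have hlt : i < j := by omega
      rw [PySem.List.pyRange_one_cons hlt, List.reverse_cons, List.foldl_append,
          ih (j - (i+1)).toNat (by omega) (i + 1) rfl]
      simp only [List.foldl_cons, List.foldl_nil]
      rw [show pvG nums j i = max (PySem.List.pyGetD nums i 0 + pvG nums j (i + 2)) (pvG nums j (i + 1)) from by rw [pvG, if_neg h]]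
      have : i + 1 + 1 = i + 2 := by ring
      rw [this]

def pvValid (nums : List Int) (j : Int) (memo : PySem.Dict Int Int) : Prop :=
  ∀ p ∈ memo.items, p.2 = pvG nums j p.1

theorem pvValid_get (nums : List Int) (j : Int) (memo : PySem.Dict Int Int)
    (hv : pvValid nums j memo) (m : Int) (hc : memo.contains m = true) :
    memo.get? m = some (pvG nums j m) := by
  cases hg : memo.get? m with
  | none =>
      rw [PySem.Dict.get?_eq_none_iff_contains] at hg
      rw [hg] at hc; cases hc
  | some v =>
      have := hv (m, v) (PySem.Dict.mem_items_of_get?_eq_some memo hg)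
      simp only at this
      rw [this]

-- the Python stack during the canonical trace: [t, t-1, …, i] (head = top)
def pvDesc (t : Int) (i : Int) : List Int :=
  if t < i then [] else t :: pvDesc (t - 1) i
termination_by (t - i + 1).toNat
decreasing_by omega

-- ascent: every key strictly between t and j is already memoised; the loop just
-- fills in t, t-1, …, i from the memo and ends with memo.get(i) = pvG i
theorem pvLoopB_ascent (nums : List Int) (i j : Int) (hij : i < j) :
    ∀ (n : Nat) (t : Int) (memo : PySem.Dict Int Int) (fuel : Nat),
      (t - i + 1).toNat = n → n + 1 ≤ fuel → pvValid nums j memo →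
      (∀ m : Int, t < m → m < j → memo.contains m = true) →
      (pvLoopB nums j fuel (pvDesc t i) memo).getD i 0 = pvG nums j i := by
  intro n
  induction n using Nat.strong_induction_on with
  | _ n ih =>
    intro t memo fuel hn hfuel hv hc
    by_cases ht : t < i
    · -- empty stack: the answer is already in the memo
      rw [pvDesc, if_pos ht]
      have hci : memo.contains i = true := hc i (by omega) hij
      have hres : ∀ f : Nat, pvLoopB nums j f [] memo = memo := by
        intro f; cases f <;> rfl
      rw [hres]
      exact PySem.Dict.getD_of_get?_eq_some memo 0 (pvValid_get nums j memo hv i hci)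
    · -- pop t
      rw [pvDesc, if_neg ht]
      obtain ⟨f, rfl⟩ : ∃ f, fuel = f + 1 := ⟨fuel - 1, by omega⟩
      rw [pvLoopB]
      by_cases hskip : j ≤ t ∨ memo.contains t = true
      · rw [if_pos (by simpa using hskip)]
        exact ih (t - 1 - i + 1).toNat (by omega) (t - 1) memo f rfl (by omega) hv
          (fun m h1 h2 => by
            rcases hskip with h | h
            · exact hc m (by omega) h2
            · by_cases hm : m = t
              · subst hm; exact h
              · exact hc m (by omega) h2)
      · rw [if_neg (by simpa using hskip)]
        rw [not_or] at hskip
        obtain ⟨htj, hct⟩ := hskip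
        have ha : (if j ≤ t + 1 then some 0 else memo.get? (t + 1)) = some (pvG nums j (t + 1)) := by
          by_cases h1 : j ≤ t + 1
          · rw [if_pos h1, pvG, if_pos h1]
          · rw [if_neg h1, pvValid_get nums j memo hv (t + 1) (hc (t + 1) (by omega) (by omega))]
        have hb : (if j ≤ t + 2 then some 0 else memo.get? (t + 2)) = some (pvG nums j (t + 2)) := by
          by_cases h2 : j ≤ t + 2
          · rw [if_pos h2, pvG, if_pos h2]
          · rw [if_neg h2, pvValid_get nums j memo hv (t + 2) (hc (t + 2) (by omega) (by omega))]
        simp only [ha, hb]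
        have hval : max (pvG nums j (t + 1)) (PySem.List.pyGetD nums t 0 + pvG nums j (t + 2))
            = pvG nums j t := by
          conv_rhs => rw [pvG]
          rw [if_neg (by omega)]
          omega
        rw [hval]
        refine ih (t - 1 - i + 1).toNat (by omega) (t - 1) _ f rfl (by omega) ?_ ?_
        · intro p hp
          rcases (PySem.Dict.mem_items_insert _ _ _ _).1 hp with hpe | ⟨hpm, _⟩
          · subst hpe; rfl
          · exact hv p hpm
        · intro m h1 h2
          rw [PySem.Dict.contains_insert]
          by_cases hm : m = t
          · subst hm; simp
          · simp only [Bool.or_eq_true, beq_iff_eq]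
            exact Or.inr (hc m (by omega) h2)

-- descent: from stack [k, k-1, …, i] and an empty memo the loop pushes up to j-1,
-- memoises it, and hands over to the ascent
theorem pvLoopB_descent (nums : List Int) (i j : Int) :
    ∀ (n : Nat) (k : Int) (fuel : Nat),
      i ≤ k → k < j → (j - 1 - k).toNat = n →
      2 * n + (k - i).toNat + 3 ≤ fuel →
      (pvLoopB nums j fuel (pvDesc k i) PySem.Dict.empty).getD i 0 = pvG nums j i := by
  intro n
  induction n using Nat.strong_induction_on with
  | _ n ih =>
    intro k fuel hik hkj hn hfuel
    rw [pvDesc, if_neg (by omega)]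
    obtain ⟨f, rfl⟩ : ∃ f, fuel = f + 1 := ⟨fuel - 1, by omega⟩
    rw [pvLoopB]
    rw [if_neg (by simp [PySem.Dict.contains_empty]; omega)]
    by_cases hlast : k = j - 1
    · -- both dependencies are past the window: memoise k = j-1 and ascend
      subst hlast
      rw [if_pos (by omega), if_pos (by omega)]
      simp only
      have hval : max 0 (PySem.List.pyGetD nums (j - 1) 0 + 0) = pvG nums j (j - 1) := by
        conv_rhs => rw [pvG]
        rw [if_neg (by omega), pvG, if_pos (by omega),
            show j - 1 + 1 = j from by ring, pvG, if_pos le_rfl]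
        omega
      rw [hval]
      refine pvLoopB_ascent nums i j (by omega) (j - 1 - 1 - i + 1).toNat (j - 1 - 1) _ f rfl
        (by omega) ?_ ?_
      · intro p hp
        rcases (PySem.Dict.mem_items_insert _ _ _ _).1 hp with hpe | ⟨hpm, _⟩
        · subst hpe; rfl
        · exact absurd hpm (by simp [PySem.Dict.empty])
      · intro m h1 h2
        have : m = j - 1 := by omega
        subst this
        exact PySem.Dict.contains_insert_self _ _ _
    · -- k+1 is inside the window and not memoised: push k, k+1
      have h1 : ¬ j ≤ k + 1 := by omega
      rw [if_neg h1]
      rw [show PySem.Dict.get? PySem.Dict.empty (k + 1) = none from PySem.Dict.get?_empty _]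
      simp only
      have hstack : pvDesc (k + 1) i = (k + 1) :: k :: pvDesc (k - 1) i := by
        rw [pvDesc, if_neg (by omega), show k + 1 - 1 = k from by ring, pvDesc,
            if_neg (by omega)]
      rw [← hstack]
      exact ih (j - 1 - (k + 1)).toNat (by omega) (k + 1) f (by omega) (by omega) rfl (by omega)

theorem ports_agree (nums : List Int) (i j : Int) :
    rob_simple nums i j = rob_simple_alt nums i j := by
  unfold rob_simple rob_simple_alt
  rw [foldA_eq_pvG nums j (j - i).toNat i rfl]
  simp only
  by_cases hij : i < j
  · rw [show [i] = pvDesc i i from by rw [pvDesc, if_neg (by omega), pvDesc, if_pos (by omega)]]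
    rw [pvLoopB_descent nums i j (j - 1 - i).toNat i (2 * (j - i).toNat + 3) le_rfl hij rfl
      (by omega)]
  · -- empty window: the loop pops i, discards it and stops with an empty memo
    have : pvLoopB nums j (2 * (j - i).toNat + 3) [i] PySem.Dict.empty = PySem.Dict.empty := by
      rw [show 2 * (j - i).toNat + 3 = (2 * (j - i).toNat + 2) + 1 from rfl, pvLoopB,
          if_pos (Or.inl (by omega))]
      cases h2 : 2 * (j - i).toNat + 2 <;> rfl
    rw [this, pvG, if_pos (by omega)]
    rfl

-- ===== VERDICT (by name: the statement is the Claim_ definition above) =====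
theorem rob_simple_spec : Claim_equal_rob_simple := by
  intro nums i j _ _
  unfold Spec_rob_simple
  exact ports_agree nums i j
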